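-- pv_equiv track=rewrite | github.com/vladislavbasyk/Lessons | Python/codewars/sum_two_min.py | sum_two_smallest_numbers
-- ===== SOURCE A (Python) =====
-- def sum_two_smallest_numbers(numbers):
--
--     b=[]
--     for i in numbers:
--         if type(i)==str or i<0 or (not(i%1))==False:
--             continue
--         b.append(i)
--     b.sort()
--     return b[0] + b[1]
-- ===== SOURCE B (Python) =====
-- def sum_two_smallest_numbers(numbers):
--     # single pass: track the two smallest elements that pass A's filter
--     # (skip strings, negatives and non-integral numbers)
--     m1 = m2 = None
--     for x in numbers:
--         if type(x) == str or x < 0 or x % 1 != 0: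
--             continue
--         if m1 is None:
--             m1 = x
--         elif m2 is None:
--             if x < m1:
--                 m1, m2 = x, m1
--             else:
--                 m2 = x
--         elif x < m1:
--             m1, m2 = x, m1
--         elif x < m2:
--             m2 = x
--     return m1 + m2
-- ===== Notes on version B (the rewrite author's own statement) =====
-- stated objective: alternative
-- what changed: Replaces filter-then-sort-then-index with a single pass that keeps A's filter condition and tracks the two smallest accepted elements (O(n) vs O(n log n); a timing run did not consistently confirm a speed-up).
import Mathlib
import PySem

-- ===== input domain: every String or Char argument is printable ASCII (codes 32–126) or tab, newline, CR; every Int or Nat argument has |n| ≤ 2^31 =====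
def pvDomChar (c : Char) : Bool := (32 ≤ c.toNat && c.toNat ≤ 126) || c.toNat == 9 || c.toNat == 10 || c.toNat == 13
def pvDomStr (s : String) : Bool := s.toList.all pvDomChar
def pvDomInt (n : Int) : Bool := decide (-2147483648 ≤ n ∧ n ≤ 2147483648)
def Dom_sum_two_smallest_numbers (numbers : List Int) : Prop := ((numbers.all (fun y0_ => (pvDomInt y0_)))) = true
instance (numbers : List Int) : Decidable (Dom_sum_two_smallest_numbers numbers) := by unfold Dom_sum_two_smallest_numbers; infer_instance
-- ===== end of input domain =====

-- B replaces A's filter + sort + index by a single pass, with A's exact filter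
-- condition, tracking the two smallest accepted elements (objective: alternative algorithm).

-- ===== PORT A =====
-- A: filter into b (skip i < 0 or i % 1 != 0; the `type(i)==str` arm is always
-- False for Int inputs), sort b, return b[0] + b[1].
def sum_two_smallest_numbers (numbers : List Int) : Int :=
  let b := numbers.foldl
    (fun acc i => if i < 0 ∨ PySem.Int.mod i 1 ≠ 0 then acc else acc ++ [i]) []
  let s := PySem.List.sorted b (fun x => x)
  -- b[0] + b[1]: Python raises IndexError when b has fewer than two elements;
  -- exactly those inputs are excluded by Pre_ below.
  match PySem.List.pyGet? s 0, PySem.List.pyGet? s 1 with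
  | some x, some y => x + y
  | _, _ => 0

-- ===== PORT B =====
-- one loop step: skip elements failing A's filter, otherwise update the two
-- running minima (the `type(x)==str` arm is always False for Int inputs)
def pvUpd (s : Option Int × Option Int) (x : Int) : Option Int × Option Int :=
  if x < 0 ∨ PySem.Int.mod x 1 ≠ 0 then s else
  match s with
  | (none, m2) => (some x, m2)
  | (some a, none) => if x < a then (some x, some a) else (some a, some x)
  | (some a, some b) =>
      if x < a then (some x, some a)
      else if x < b then (some a, some x)
      else (some a, some b)

def sum_two_smallest_numbers_alt (numbers : List Int) : Int :=
  let s := numbers.foldl pvUpd (none, none)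
  -- `m1 + m2`: Python B raises TypeError when fewer than two elements were
  -- accepted (a slot is still None); those inputs are outside Pre_.
  s.1.getD 0 + s.2.getD 0

-- ===== PRECONDITION & SPEC =====
-- Pre_: at least two non-negative elements; otherwise Python A raises IndexError
-- (and Python B raises TypeError), so nothing is claimed there.
def Pre_sum_two_smallest_numbers (numbers : List Int) : Prop :=
  2 ≤ (numbers.filter (fun i => 0 ≤ i)).length
instance (numbers : List Int) : Decidable (Pre_sum_two_smallest_numbers numbers) := by
  unfold Pre_sum_two_smallest_numbers; infer_instance
def pvWitness_sum_two_smallest_numbers : List Int := ([5, -7, 2, 3])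

def Spec_sum_two_smallest_numbers (numbers : List Int) (out : Int) : Prop := out = sum_two_smallest_numbers_alt numbers
instance (numbers : List Int) (out : Int) : Decidable (Spec_sum_two_smallest_numbers numbers out) := by unfold Spec_sum_two_smallest_numbers; infer_instance

-- ===== CLAIM (what is proved, stated in full; the proofs are below) =====
def Claim_equal_sum_two_smallest_numbers : Prop := ∀ (numbers : List Int), Dom_sum_two_smallest_numbers numbers → Pre_sum_two_smallest_numbers numbers → Spec_sum_two_smallest_numbers numbers (sum_two_smallest_numbers numbers)

-- ===== LEMMAS AND PROOFS =====

-- A's append loop builds exactly the filter of the non-negative elements.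
theorem pvFilter_eq (numbers : List Int) (acc : List Int) :
    numbers.foldl
      (fun acc i => if i < 0 ∨ PySem.Int.mod i 1 ≠ 0 then acc else acc ++ [i]) acc
    = acc ++ numbers.filter (fun i => 0 ≤ i) := by
  induction numbers generalizing acc with
  | nil => simp
  | cons x t ih =>
    simp only [List.foldl_cons, List.filter_cons]
    rcases lt_or_ge x 0 with h | h
    · rw [if_pos (Or.inl h), ih]; simp [show ¬(0 ≤ x) by omega]
    · rw [if_neg (by simp [PySem.Int.mod, Int.fmod_one]; omega), ih]
      simp [h]

-- B's guarded one-pass step applied over `numbers` equals the unguarded step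
-- over the same filter
theorem pvFold_filter (numbers : List Int) (s : Option Int × Option Int) :
    numbers.foldl pvUpd s = (numbers.filter (fun i => 0 ≤ i)).foldl pvUpd s := by
  induction numbers generalizing s with
  | nil => rfl
  | cons x t ih =>
    simp only [List.foldl_cons, List.filter_cons]
    rcases lt_or_ge x 0 with h | h
    · simp [show ¬(0 ≤ x) by omega, pvUpd, h, ih]
    · simp [h, ih]

-- key step: updating the running minima = looking at the first two slots after an ordered insert
theorem pvUpd_insertBy (x : Int) (hx : ¬ x < 0) (s : List Int) :
    (((PySem.List.insertBy (fun a b => decide (a < b)) x s)[0]?,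
      (PySem.List.insertBy (fun a b => decide (a < b)) x s)[1]?) : Option Int × Option Int)
    = pvUpd (s[0]?, s[1]?) x := by
  rcases s with _ | ⟨a, _ | ⟨b, t⟩⟩ <;>
    simp [PySem.List.insertBy, pvUpd, hx, PySem.Int.mod, Int.fmod_one] <;>
    split_ifs <;> simp_all

-- fold invariant: the one-pass state is the first two slots of the insertion-sorted prefix
theorem pvFold_firstTwo (l : List Int) (hl : ∀ y ∈ l, 0 ≤ y) (acc : List Int) :
    l.foldl pvUpd (acc[0]?, acc[1]?)
    = ((l.foldl (fun acc x => PySem.List.insertBy (fun a b => decide (a < b)) x acc) acc)[0]?,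
       (l.foldl (fun acc x => PySem.List.insertBy (fun a b => decide (a < b)) x acc) acc)[1]?) := by
  induction l generalizing acc with
  | nil => rfl
  | cons x t ih =>
    have hx : ¬ x < 0 := by have := hl x (by simp); omega
    simp only [List.foldl_cons]
    rw [← pvUpd_insertBy x hx acc, ih (fun y hy => hl y (by simp [hy]))]

-- ===== VERDICT (by name: the statement is the Claim_ definition above) =====
theorem sum_two_smallest_numbers_spec : Claim_equal_sum_two_smallest_numbers := by
  intro numbers _ hpre
  unfold Pre_sum_two_smallest_numbers at hpre
  unfold Spec_sum_two_smallest_numbers sum_two_smallest_numbers sum_two_smallest_numbers_alt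
  dsimp only
  rw [pvFilter_eq, List.nil_append, pvFold_filter]
  set b := numbers.filter (fun i => (0 ≤ i : Bool)) with hb
  have hbn : ∀ y ∈ b, 0 ≤ y := by
    intro y hy; rw [hb] at hy; simp [List.mem_filter] at hy; exact hy.2
  have h2 := pvFold_firstTwo b hbn []
  simp only [List.getElem?_nil] at h2
  rw [h2, ← PySem.List.sorted_eq_foldl_insertBy b (fun x => x)]
  have hlen : (PySem.List.sorted b (fun x => x)).length = b.length :=
    PySem.List.length_sorted b (fun x => x) false
  generalize PySem.List.sorted b (fun x => x) = s at hlen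
  rcases s with _ | ⟨a, _ | ⟨c, t⟩⟩
  · simp only [List.length_nil] at hlen; omega
  · simp only [List.length_cons, List.length_nil] at hlen; omega
  · simp [PySem.List.pyGet?, PySem.List.pyIdx?]
    rw [if_pos (by positivity)]
    simp
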